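-- pv_equiv track=rewrite | github.com/hanzoai/python-sdk | pkg/hanzo-mcp/hanzo_mcp/exact_tools.py | _ts_transitive_deps
-- ===== SOURCE A (Python) =====
-- from typing import Any, Dict, List, Literal, Optional, Union
--
-- def _ts_transitive_deps(start_file: str, graph: Dict[str, Any]) -> List[str]:
--     visited = set()
--     stack = [start_file]
--     modules = set()
--     while stack:
--         current = stack.pop()
--         if current in visited:
--             continue
--         visited.add(current)
--         modules.update(graph["modules"].get(current, []))
--         for neighbor in graph["graph"].get(current, []):
--             if neighbor not in visited:
--                 stack.append(neighbor)
--     return sorted(modules)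
-- ===== SOURCE B (Python) =====
-- def _ts_transitive_deps(start_file, graph):
--     mods_of = graph["modules"]
--     nbrs_of = graph["graph"]
--     reachable = {start_file}
--     for _ in range(len(nbrs_of) + 1):
--         reachable.update([n for v in reachable for n in nbrs_of.get(v, [])])
--     return sorted({m for v in reachable for m in mods_of.get(v, [])})
-- ===== Notes on version B (the rewrite author's own statement) =====
-- stated objective: alternative
-- what changed: A runs a LIFO-stack DFS collecting modules as it visits; B computes the reachable set by a bounded fixed-point iteration (len(graph)+1 rounds of adding all neighbors of the current set) and then collects modules in a separate comprehension over the reachable set.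
import Mathlib
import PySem

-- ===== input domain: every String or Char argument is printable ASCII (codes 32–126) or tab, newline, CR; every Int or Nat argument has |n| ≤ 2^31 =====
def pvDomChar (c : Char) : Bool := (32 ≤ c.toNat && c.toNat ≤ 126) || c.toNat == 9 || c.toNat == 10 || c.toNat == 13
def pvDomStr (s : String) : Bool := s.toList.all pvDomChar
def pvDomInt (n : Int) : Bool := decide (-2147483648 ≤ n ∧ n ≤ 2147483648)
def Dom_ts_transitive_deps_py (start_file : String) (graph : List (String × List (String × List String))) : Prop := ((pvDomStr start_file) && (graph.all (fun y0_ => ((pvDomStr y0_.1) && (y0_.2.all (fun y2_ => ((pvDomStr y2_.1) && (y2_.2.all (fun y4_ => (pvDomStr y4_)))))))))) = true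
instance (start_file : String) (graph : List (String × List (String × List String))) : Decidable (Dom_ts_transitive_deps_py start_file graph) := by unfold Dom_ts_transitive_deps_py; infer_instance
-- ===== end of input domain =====

-- B replaces A's interleaved LIFO-stack DFS by a bounded fixed-point iteration (len(graph)+1
-- rounds of adding all neighbours of the current reachable set) followed by a separate pass
-- collecting the module sets; same sorted result (alternative, not claimed faster).

-- ===== PORT A =====
-- graph["modules"] / graph["graph"] as inner dicts (total helper; Pre_ guarantees the keys exist,
-- exactly where the Python's graph["..."] does not raise KeyError)
def pvInner (graph : List (String × List (String × List String))) (k : String) : PySem.Dict String (List String) :=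
  PySem.Dict.mk (((PySem.Dict.mk graph).get? k).getD [])

-- graph["graph"].get(c, [])
def pvNbr (graph : List (String × List (String × List String))) (c : String) : List String :=
  PySem.Dict.getD (pvInner graph "graph") c []

-- graph["modules"].get(v, [])
def pvMods (graph : List (String × List (String × List String))) (v : String) : List String :=
  PySem.Dict.getD (pvInner graph "modules") v []

-- proof-side quantities for the termination measures only
def pvGKeys (graph : List (String × List (String × List String))) : List String :=
  PySem.List.dedup ((pvInner graph "graph").keys)
def pvC (graph : List (String × List (String × List String))) : Nat :=
  ((pvInner graph "graph").values.map List.length).sum + 2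
def pvU (graph : List (String × List (String × List String))) (visited : PySem.Set String) : Nat :=
  ((pvGKeys graph).filter (fun k => !(PySem.Set.contains visited k))).length

theorem pv_filter_len_le {α : Type} {p q : α → Bool} (l : List α)
    (h : ∀ x ∈ l, p x = true → q x = true) : (l.filter p).length ≤ (l.filter q).length := by
  induction l with
  | nil => simp
  | cons a t ih =>
    have ht := ih (fun x hx => h x (List.mem_cons_of_mem _ hx))
    by_cases hp : p a = true
    · simp [hp, h a (List.mem_cons_self) hp]; omega
    · simp only [List.filter_cons, Bool.not_eq_true] at *
      rw [hp]
      cases hq : q a <;> simp <;> omega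

theorem pv_filter_len_lt {α : Type} {p q : α → Bool} (l : List α)
    (h : ∀ x ∈ l, p x = true → q x = true) (x : α) (hx : x ∈ l)
    (hq : q x = true) (hp : p x = false) : (l.filter p).length < (l.filter q).length := by
  induction l with
  | nil => cases hx
  | cons a t ih =>
    rcases List.mem_cons.mp hx with rfl | hxt
    · have ht := pv_filter_len_le t (fun y hy => h y (List.mem_cons_of_mem _ hy))
      simp [hp, hq]; omega
    · have h' : ∀ y ∈ t, p y = true → q y = true := fun y hy => h y (List.mem_cons_of_mem _ hy)
      have ht := ih h' hxt
      by_cases hpa : p a = true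
      · simp [hpa, h a (List.mem_cons_self) hpa]; omega
      · simp only [Bool.not_eq_true] at hpa
        simp only [List.filter_cons, hpa]
        cases hqa : q a <;> simp <;> omega

theorem pv_not_contains_iff {α : Type} [BEq α] [LawfulBEq α] (s : PySem.Set α) (x : α) :
    (!(PySem.Set.contains s x)) = true ↔ x ∉ s := by
  rw [← PySem.Set.contains_iff s x]
  cases PySem.Set.contains s x <;> simp

theorem pvU_add_le (graph : List (String × List (String × List String)))
    (visited : PySem.Set String) (c : String) :
    pvU graph (PySem.Set.add visited c) ≤ pvU graph visited := by
  apply pv_filter_len_le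
  intro x _ hx
  rw [pv_not_contains_iff] at hx ⊢
  exact fun hmem => hx ((PySem.Set.mem_add _ _ _).mpr (Or.inl hmem))

theorem pvU_add_lt (graph : List (String × List (String × List String)))
    (visited : PySem.Set String) (c : String) (hk : c ∈ pvGKeys graph)
    (hc : PySem.Set.contains visited c = false) :
    pvU graph (PySem.Set.add visited c) < pvU graph visited := by
  refine pv_filter_len_lt _ ?_ c hk ?_ ?_
  · intro x _ hx
    rw [pv_not_contains_iff] at hx ⊢
    exact fun hmem => hx ((PySem.Set.mem_add _ _ _).mpr (Or.inl hmem))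
  · rw [pv_not_contains_iff]
    intro hmem
    rw [← PySem.Set.contains_iff] at hmem
    rw [hc] at hmem
    cases hmem
  · have hm : c ∈ PySem.Set.add visited c := (PySem.Set.mem_add _ _ _).mpr (Or.inr rfl)
    rw [← PySem.Set.contains_iff] at hm
    rw [hm]
    rfl

theorem pvNbr_nil_of_not_key (graph : List (String × List (String × List String))) (c : String)
    (hk : c ∉ pvGKeys graph) : pvNbr graph c = [] := by
  have hmem : c ∉ (pvInner graph "graph").keys := by
    intro h; exact hk (by simpa [pvGKeys, PySem.List.mem_dedup] using h)
  have hcon : (pvInner graph "graph").contains c = false := by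
    rw [PySem.Dict.contains_eq_decide_mem_keys]; simpa using hmem
  simpa [pvNbr] using PySem.Dict.getD_of_not_contains _ _ hcon

theorem pvNbr_len_le (graph : List (String × List (String × List String))) (c : String) :
    (pvNbr graph c).length ≤ pvC graph - 2 := by
  by_cases hk : c ∈ pvGKeys graph
  · cases hg : (pvInner graph "graph").get? c with
    | none => simp [pvNbr, PySem.Dict.getD_eq_get?_getD, hg, pvC]
    | some v =>
      have hv : (c, v) ∈ (pvInner graph "graph").items := PySem.Dict.mem_items_of_get?_eq_some _ hg
      have hval : v.length ∈ ((pvInner graph "graph").values.map List.length) := by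
        simp only [PySem.Dict.values, List.map_map]
        exact List.mem_map.mpr ⟨(c, v), hv, rfl⟩
      have hle : v.length ≤ ((pvInner graph "graph").values.map List.length).sum :=
        List.le_sum_of_mem hval
      simp only [pvNbr, PySem.Dict.getD_eq_get?_getD, hg, Option.getD_some, pvC]
      omega
  · simp [pvNbr_nil_of_not_key graph c hk]

-- A's while loop, state (visited, stack, modules); stack.pop() pops the LAST element
def tsLoopA (graph : List (String × List (String × List String)))
    (visited : PySem.Set String) (stack : List String) (modules : PySem.Set String) :
    PySem.Set String × PySem.Set String :=
  match h : stack.getLast? with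
  | none => (visited, modules)
  | some current =>
    let rest := stack.dropLast
    if hv : PySem.Set.contains visited current = true then
      tsLoopA graph visited rest modules
    else
      let visited' := PySem.Set.add visited current
      let modules' := PySem.Set.update modules (pvMods graph current)
      let stack' := rest ++ (pvNbr graph current).filter (fun n => !(PySem.Set.contains visited' n))
      tsLoopA graph visited' stack' modules'
termination_by pvC graph * pvU graph visited + stack.length
decreasing_by
  · have hne : stack ≠ [] := by intro hnil; rw [hnil] at h; simp at h
    have hlen : stack.dropLast.length = stack.length - 1 := by simp
    have hpos : 0 < stack.length := List.length_pos_iff.mpr hne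
    omega
  · have hne : stack ≠ [] := by intro hnil; rw [hnil] at h; simp at h
    have hlen : stack.dropLast.length = stack.length - 1 := by simp
    have hpos : 0 < stack.length := List.length_pos_iff.mpr hne
    have hC2 : 2 ≤ pvC graph := by simp [pvC]
    have hfle : ((pvNbr graph current).filter
        (fun n => !(PySem.Set.contains (PySem.Set.add visited current) n))).length
        ≤ (pvNbr graph current).length := List.length_filter_le _ _
    simp only [List.length_append]
    by_cases hk : current ∈ pvGKeys graph
    · have hUlt := pvU_add_lt graph visited current hk (by simpa using hv)
      have hnl := pvNbr_len_le graph current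
      have hmul : pvC graph * pvU graph (PySem.Set.add visited current) + pvC graph
          ≤ pvC graph * pvU graph visited := by
        have := Nat.mul_le_mul_left (pvC graph) hUlt
        calc pvC graph * pvU graph (PySem.Set.add visited current) + pvC graph
            = pvC graph * (pvU graph (PySem.Set.add visited current) + 1) := by ring
          _ ≤ pvC graph * pvU graph visited := Nat.mul_le_mul_left _ (by omega)
      omega
    · have hnil := pvNbr_nil_of_not_key graph current hk
      have hUle := pvU_add_le graph visited current
      have hmul := Nat.mul_le_mul_left (pvC graph) hUle
      rw [hnil] at *
      simp only [List.filter_nil, List.length_nil]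
      omega

def ts_transitive_deps_py (start_file : String) (graph : List (String × List (String × List String))) : List String :=
  PySem.List.sorted (tsLoopA graph PySem.Set.empty [start_file] PySem.Set.empty).2 (fun x => x) false

-- ===== PORT B =====
-- one round of B's loop body: reachable.update([n for v in reachable for n in nbrs_of.get(v, [])])
def pvStepB (graph : List (String × List (String × List String))) (reachable : PySem.Set String) :
    PySem.Set String :=
  PySem.Set.update reachable (reachable.flatMap (fun v => pvNbr graph v))

def ts_transitive_deps_py_alt (start_file : String) (graph : List (String × List (String × List String))) : List String :=
  -- for _ in range(len(nbrs_of) + 1): one pvStepB per round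
  let reach := (PySem.List.pyRange 0 (((pvInner graph "graph").size : Int) + 1) 1).foldl
    (fun S _ => pvStepB graph S) (PySem.Set.ofList [start_file])
  -- sorted({m for v in reachable for m in mods_of.get(v, [])})
  PySem.List.sorted (PySem.Set.ofList (reach.flatMap (fun v => pvMods graph v))) (fun x => x) false

-- ===== PRECONDITION & SPEC =====
-- Pre_ excludes exactly the graphs missing the "modules" or "graph" key, on which the Python A
-- raises KeyError (and Python B raises KeyError as well).
def Pre_ts_transitive_deps_py (start_file : String) (graph : List (String × List (String × List String))) : Prop :=
  ((PySem.Dict.mk graph).get? "modules").isSome = true ∧ ((PySem.Dict.mk graph).get? "graph").isSome = true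
instance (start_file : String) (graph : List (String × List (String × List String))) : Decidable (Pre_ts_transitive_deps_py start_file graph) := by unfold Pre_ts_transitive_deps_py; infer_instance

def pvWitness_ts_transitive_deps_py : String × (List (String × List (String × List String))) :=
  ("a.ts", [("modules", [("a.ts", ["os"]), ("b.ts", ["sys"])]), ("graph", [("a.ts", ["b.ts"])])])

def Spec_ts_transitive_deps_py (start_file : String) (graph : List (String × List (String × List String))) (out : List String) : Prop := out = ts_transitive_deps_py_alt start_file graph
instance (start_file : String) (graph : List (String × List (String × List String))) (out : List String) : Decidable (Spec_ts_transitive_deps_py start_file graph out) := by unfold Spec_ts_transitive_deps_py; infer_instance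

-- ===== CLAIM (what is proved, stated in full; the proofs are below) =====
def Claim_equal_ts_transitive_deps_py : Prop := ∀ (start_file : String) (graph : List (String × List (String × List String))), Dom_ts_transitive_deps_py start_file graph → Pre_ts_transitive_deps_py start_file graph → Spec_ts_transitive_deps_py start_file graph (ts_transitive_deps_py start_file graph)

-- ===== LEMMAS AND PROOFS =====
theorem pv_witness_ok : Dom_ts_transitive_deps_py pvWitness_ts_transitive_deps_py.1 pvWitness_ts_transitive_deps_py.2 ∧ Pre_ts_transitive_deps_py pvWitness_ts_transitive_deps_py.1 pvWitness_ts_transitive_deps_py.2 := by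
  constructor <;> decide

-- reachability in graph["graph"], the common characterisation of both traversals
inductive pvReach (graph : List (String × List (String × List String))) (s : String) : String → Prop
  | refl : pvReach graph s s
  | step {a b : String} : pvReach graph s a → b ∈ pvNbr graph a → pvReach graph s b

theorem pv_stack_eq (stack : List String) (current : String)
    (h : stack.getLast? = some current) : stack = stack.dropLast ++ [current] := by
  obtain ⟨ys, rfl⟩ := List.getLast?_eq_some_iff.mp h
  simp

theorem loopA_visited_mono (graph : List (String × List (String × List String)))
    (visited : PySem.Set String) (stack : List String) (modules : PySem.Set String) :
    ∀ x ∈ visited, x ∈ (tsLoopA graph visited stack modules).1 := by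
  fun_induction tsLoopA graph visited stack modules with
  | case1 visited stack modules h => intro x hx; exact hx
  | case2 visited stack modules current h rest hv ih => exact ih
  | case3 visited stack modules current h rest hv v' m' s' ih =>
    intro x hx
    exact ih x ((PySem.Set.mem_add _ _ _).mpr (Or.inl hx))

theorem loopA_stack_sub (graph : List (String × List (String × List String)))
    (visited : PySem.Set String) (stack : List String) (modules : PySem.Set String) :
    ∀ x ∈ stack, x ∈ (tsLoopA graph visited stack modules).1 := by
  fun_induction tsLoopA graph visited stack modules with
  | case1 visited stack modules h =>
    intro x hx
    rw [List.getLast?_eq_none_iff.mp h] at hx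
    cases hx
  | case2 visited stack modules current h rest hv ih =>
    intro x hx
    rw [pv_stack_eq stack current h] at hx
    rcases List.mem_append.mp hx with hx | hx
    · exact ih x hx
    · rw [List.mem_singleton.mp hx]
      exact loopA_visited_mono _ _ _ _ current ((PySem.Set.contains_iff _ _).mp hv)
  | case3 visited stack modules current h rest hv v' m' s' ih =>
    intro x hx
    rw [pv_stack_eq stack current h] at hx
    rcases List.mem_append.mp hx with hx | hx
    · exact ih x (List.mem_append.mpr (Or.inl hx))
    · rw [List.mem_singleton.mp hx]
      exact loopA_visited_mono _ _ _ _ current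
        ((PySem.Set.mem_add _ _ _).mpr (Or.inr rfl))

theorem loopA_closed (graph : List (String × List (String × List String)))
    (visited : PySem.Set String) (stack : List String) (modules : PySem.Set String)
    (hI : ∀ u ∈ visited, ∀ n ∈ pvNbr graph u, n ∈ visited ∨ n ∈ stack) :
    ∀ u ∈ (tsLoopA graph visited stack modules).1, ∀ n ∈ pvNbr graph u,
      n ∈ (tsLoopA graph visited stack modules).1 := by
  fun_induction tsLoopA graph visited stack modules with
  | case1 visited stack modules h =>
    intro u hu n hn
    rcases hI u hu n hn with hm | hm
    · exact hm
    · rw [List.getLast?_eq_none_iff.mp h] at hm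
      cases hm
  | case2 visited stack modules current h rest hv ih =>
    refine ih ?_
    intro u hu n hn
    rcases hI u hu n hn with hm | hm
    · exact Or.inl hm
    · rw [pv_stack_eq stack current h] at hm
      rcases List.mem_append.mp hm with hm | hm
      · exact Or.inr hm
      · rw [List.mem_singleton.mp hm]
        exact Or.inl ((PySem.Set.contains_iff _ _).mp hv)
  | case3 visited stack modules current h rest hv v' m' s' ih =>
    refine ih ?_
    intro u hu n hn
    rcases (PySem.Set.mem_add _ _ _).mp hu with hu | rfl
    · rcases hI u hu n hn with hm | hm
      · exact Or.inl ((PySem.Set.mem_add _ _ _).mpr (Or.inl hm))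
      · rw [pv_stack_eq stack current h] at hm
        rcases List.mem_append.mp hm with hm | hm
        · exact Or.inr (List.mem_append.mpr (Or.inl hm))
        · rw [List.mem_singleton.mp hm]
          exact Or.inl ((PySem.Set.mem_add _ _ _).mpr (Or.inr rfl))
    · by_cases hnv : n ∈ PySem.Set.add visited u
      · exact Or.inl hnv
      · refine Or.inr (List.mem_append.mpr (Or.inr ?_))
        refine List.mem_filter.mpr ⟨hn, ?_⟩
        rw [pv_not_contains_iff]
        exact hnv

theorem loopA_sound (graph : List (String × List (String × List String))) (start : String)
    (visited : PySem.Set String) (stack : List String) (modules : PySem.Set String)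
    (h1 : ∀ u ∈ visited, pvReach graph start u) (h2 : ∀ y ∈ stack, pvReach graph start y) :
    ∀ u ∈ (tsLoopA graph visited stack modules).1, pvReach graph start u := by
  fun_induction tsLoopA graph visited stack modules with
  | case1 visited stack modules h => exact h1
  | case2 visited stack modules current h rest hv ih =>
    refine ih h1 ?_
    intro y hy
    exact h2 y (by rw [pv_stack_eq stack current h]; exact List.mem_append.mpr (Or.inl hy))
  | case3 visited stack modules current h rest hv v' m' s' ih =>
    have hcur : pvReach graph start current :=
      h2 current (by rw [pv_stack_eq stack current h]; simp)
    refine ih ?_ ?_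
    · intro u hu
      rcases (PySem.Set.mem_add _ _ _).mp hu with hu | rfl
      · exact h1 u hu
      · exact hcur
    · intro y hy
      rcases List.mem_append.mp hy with hy | hy
      · exact h2 y (by rw [pv_stack_eq stack current h]; exact List.mem_append.mpr (Or.inl hy))
      · exact pvReach.step hcur (List.mem_filter.mp hy).1

theorem loopA_modules (graph : List (String × List (String × List String)))
    (visited : PySem.Set String) (stack : List String) (modules : PySem.Set String)
    (hJ : ∀ x, x ∈ modules ↔ ∃ u ∈ visited, x ∈ pvMods graph u) :
    ∀ x, x ∈ (tsLoopA graph visited stack modules).2 ↔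
      ∃ u ∈ (tsLoopA graph visited stack modules).1, x ∈ pvMods graph u := by
  fun_induction tsLoopA graph visited stack modules with
  | case1 visited stack modules h => exact hJ
  | case2 visited stack modules current h rest hv ih => exact ih hJ
  | case3 visited stack modules current h rest hv v' m' s' ih =>
    refine ih ?_
    intro x
    rw [PySem.Set.mem_update]
    constructor
    · rintro (hx | hx)
      · obtain ⟨u, hu, hxu⟩ := (hJ x).mp hx
        exact ⟨u, (PySem.Set.mem_add _ _ _).mpr (Or.inl hu), hxu⟩
      · exact ⟨current, (PySem.Set.mem_add _ _ _).mpr (Or.inr rfl), hx⟩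
    · rintro ⟨u, hu, hxu⟩
      rcases (PySem.Set.mem_add _ _ _).mp hu with hu | rfl
      · exact Or.inl ((hJ x).mpr ⟨u, hu, hxu⟩)
      · exact Or.inr hxu

theorem loopA_modules_nodup (graph : List (String × List (String × List String)))
    (visited : PySem.Set String) (stack : List String) (modules : PySem.Set String)
    (hnd : modules.Nodup) : (tsLoopA graph visited stack modules).2.Nodup := by
  fun_induction tsLoopA graph visited stack modules with
  | case1 visited stack modules h => exact hnd
  | case2 visited stack modules current h rest hv ih => exact ih hnd
  | case3 visited stack modules current h rest hv v' m' s' ih =>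
    exact ih (PySem.Set.nodup_update _ _ hnd)

theorem pv_reach_mem_of_closed (graph : List (String × List (String × List String)))
    (start : String) (V : PySem.Set String) (hs : start ∈ V)
    (hcl : ∀ u ∈ V, ∀ n ∈ pvNbr graph u, n ∈ V) :
    ∀ x, pvReach graph start x → x ∈ V := by
  intro x hx
  induction hx with
  | refl => exact hs
  | step ha hb ih => exact hcl _ ih _ hb

-- ---- B-side lemmas: the iterated step reaches the closure within size+1 rounds ----

-- the k-th iterate of B's round, started from {start}
def pvIterB (graph : List (String × List (String × List String))) (start : String) : Nat → PySem.Set String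
  | 0 => PySem.Set.ofList [start]
  | k + 1 => pvStepB graph (pvIterB graph start k)

theorem pv_foldl_const {α β : Type} (f : β → β) : ∀ (l : List α) (S : β),
    l.foldl (fun S _ => f S) S = f^[l.length] S := by
  intro l
  induction l with
  | nil => intro S; simp
  | cons a t ih =>
    intro S
    simp only [List.foldl_cons, List.length_cons, ih, Function.iterate_succ_apply]

theorem pv_iterate_eq_iterB (graph : List (String × List (String × List String)))
    (start : String) (k : Nat) :
    (pvStepB graph)^[k] (PySem.Set.ofList [start]) = pvIterB graph start k := by
  induction k with
  | zero => rfl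
  | succ k ih => rw [Function.iterate_succ_apply', ih]; rfl

theorem pv_mem_stepB (graph : List (String × List (String × List String)))
    (S : PySem.Set String) (x : String) :
    x ∈ pvStepB graph S ↔ x ∈ S ∨ ∃ v ∈ S, x ∈ pvNbr graph v := by
  rw [pvStepB, PySem.Set.mem_update, List.mem_flatMap]

theorem pv_iterB_mono_succ (graph : List (String × List (String × List String))) (start : String)
    (k : Nat) : ∀ x ∈ pvIterB graph start k, x ∈ pvIterB graph start (k + 1) := by
  intro x hx
  exact (pv_mem_stepB _ _ _).mpr (Or.inl hx)

theorem pv_iterB_mono (graph : List (String × List (String × List String))) (start : String)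
    (j k : Nat) (hjk : j ≤ k) : ∀ x ∈ pvIterB graph start j, x ∈ pvIterB graph start k := by
  induction k with
  | zero => rw [Nat.le_zero.mp hjk]; intro x hx; exact hx
  | succ k ih =>
    rcases Nat.le_succ_iff.mp hjk with h | rfl
    · intro x hx
      exact pv_iterB_mono_succ graph start k x (ih h x hx)
    · intro x hx; exact hx

theorem pv_iterB_sound (graph : List (String × List (String × List String))) (start : String)
    (k : Nat) : ∀ x ∈ pvIterB graph start k, pvReach graph start x := by
  induction k with
  | zero =>
    intro x hx
    rw [List.mem_singleton.mp ((PySem.Set.mem_ofList _ _).mp hx)]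
    exact pvReach.refl
  | succ k ih =>
    intro x hx
    rcases (pv_mem_stepB _ _ _).mp hx with hx | ⟨v, hv, hn⟩
    · exact ih x hx
    · exact pvReach.step (ih v hv) hn

theorem pvU_le_of_subset (graph : List (String × List (String × List String)))
    (S T : PySem.Set String) (h : ∀ x ∈ S, x ∈ T) : pvU graph T ≤ pvU graph S := by
  apply pv_filter_len_le
  intro x _ hx
  rw [pv_not_contains_iff] at hx ⊢
  exact fun hm => hx (h x hm)

-- if a round adds no new graph key, the next set is neighbour-closed
theorem pv_closed_of_U_eq (graph : List (String × List (String × List String))) (start : String)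
    (k : Nat) (hU : pvU graph (pvIterB graph start (k + 1)) = pvU graph (pvIterB graph start k)) :
    ∀ v ∈ pvIterB graph start (k + 1), ∀ n ∈ pvNbr graph v, n ∈ pvIterB graph start (k + 1) := by
  have hkeys : ∀ key ∈ pvGKeys graph, key ∈ pvIterB graph start (k + 1) →
      key ∈ pvIterB graph start k := by
    intro key hkey hk1
    by_contra hk0
    have hlt : pvU graph (pvIterB graph start (k + 1)) < pvU graph (pvIterB graph start k) := by
      refine pv_filter_len_lt _ ?_ key hkey ?_ ?_
      · intro x _ hx
        rw [pv_not_contains_iff] at hx ⊢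
        exact fun hm => hx (pv_iterB_mono_succ graph start k x hm)
      · rw [pv_not_contains_iff]; exact hk0
      · have : PySem.Set.contains (pvIterB graph start (k + 1)) key = true :=
          (PySem.Set.contains_iff _ _).mpr hk1
        simp only [Bool.not_eq_false', this]
    omega
  intro v hv n hn
  by_cases hkv : v ∈ pvGKeys graph
  · have hv0 : v ∈ pvIterB graph start k := hkeys v hkv hv
    exact (pv_mem_stepB _ _ _).mpr (Or.inr ⟨v, hv0, hn⟩)
  · rw [pvNbr_nil_of_not_key graph v hkv] at hn
    cases hn

-- B's step is literally the identity on a neighbour-closed set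
theorem pv_add_self {α : Type} [BEq α] [LawfulBEq α] (S : PySem.Set α) (x : α) (hx : x ∈ S) :
    PySem.Set.add S x = S := by
  simp [PySem.Set.add, hx]

theorem pv_update_no_new {α : Type} [BEq α] [LawfulBEq α] : ∀ (l : List α) (S : PySem.Set α),
    (∀ x ∈ l, x ∈ S) → PySem.Set.update S l = S := by
  intro l
  induction l with
  | nil => intro S _; rfl
  | cons a t ih =>
    intro S h
    have ha : PySem.Set.add S a = S := pv_add_self S a (h a (List.mem_cons_self))
    show (a :: t).foldl PySem.Set.add S = S
    rw [List.foldl_cons, ha]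
    exact ih S (fun x hx => h x (List.mem_cons_of_mem _ hx))

theorem pv_stepB_eq_self (graph : List (String × List (String × List String)))
    (S : PySem.Set String) (hcl : ∀ v ∈ S, ∀ n ∈ pvNbr graph v, n ∈ S) :
    pvStepB graph S = S := by
  refine pv_update_no_new _ S ?_
  intro x hx
  obtain ⟨v, hv, hn⟩ := List.mem_flatMap.mp hx
  exact hcl v hv x hn

theorem pv_iterB_stable (graph : List (String × List (String × List String))) (start : String)
    (k : Nat) (hfix : pvStepB graph (pvIterB graph start k) = pvIterB graph start k) :
    ∀ m, k ≤ m → pvIterB graph start m = pvIterB graph start k := by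
  intro m hkm
  induction m with
  | zero => rw [Nat.le_zero.mp hkm]
  | succ m ih =>
    rcases Nat.le_succ_iff.mp hkm with h | rfl
    · show pvStepB graph (pvIterB graph start m) = _
      rw [ih h, hfix]
    · rfl

theorem pv_dedup_len_le {α : Type} [BEq α] [LawfulBEq α] (l : List α) :
    (PySem.List.dedup l).length ≤ l.length := by
  rw [PySem.List.dedup_eq_ofList, PySem.Set.ofList_eq_foldl]
  suffices h : ∀ (l : List α) (S : PySem.Set α),
      (l.foldl PySem.Set.add S).length ≤ S.length + l.length by
    simpa using h l []
  intro l'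
  induction l' with
  | nil => intro S; simp
  | cons a t ih =>
    intro S
    have := ih (PySem.Set.add S a)
    have hadd : (PySem.Set.add S a).length ≤ S.length + 1 := by
      by_cases hm : a ∈ S <;> simp [PySem.Set.add, hm]
    simp only [List.foldl_cons, List.length_cons]
    omega

-- pigeonhole: within (pvGKeys).length + 1 rounds some round adds no new graph key
theorem pv_exists_fix (graph : List (String × List (String × List String))) (start : String) :
    ∃ k ≤ (pvGKeys graph).length,
      pvU graph (pvIterB graph start (k + 1)) = pvU graph (pvIterB graph start k) := by
  by_contra hno
  push_neg at hno
  have hlt : ∀ k ≤ (pvGKeys graph).length,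
      pvU graph (pvIterB graph start (k + 1)) < pvU graph (pvIterB graph start k) := by
    intro k hk
    have hle := pvU_le_of_subset graph _ _ (pv_iterB_mono_succ graph start k)
    have := hno k hk
    omega
  have haux : ∀ m, m ≤ (pvGKeys graph).length + 1 →
      pvU graph (pvIterB graph start m) + m ≤ pvU graph (pvIterB graph start 0) := by
    intro m
    induction m with
    | zero => intro _; omega
    | succ m ih =>
      intro hm
      have h1 := ih (by omega)
      have h2 := hlt m (by omega)
      omega
  have h0 : pvU graph (pvIterB graph start 0) ≤ (pvGKeys graph).length :=
    List.length_filter_le _ _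
  have := haux ((pvGKeys graph).length + 1) (by omega)
  omega

theorem pv_keys_len_eq_size (graph : List (String × List (String × List String))) :
    ((pvInner graph "graph").keys).length = (pvInner graph "graph").size := by
  simp [PySem.Dict.keys, PySem.Dict.size]

-- the set B computes is exactly the reachable set
theorem pv_reachB (graph : List (String × List (String × List String))) (start : String) :
    ∀ x, x ∈ pvIterB graph start ((pvInner graph "graph").size + 1) ↔ pvReach graph start x := by
  obtain ⟨k, hk, hU⟩ := pv_exists_fix graph start
  have hcl := pv_closed_of_U_eq graph start k hU
  have hfix := pv_stepB_eq_self graph _ hcl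
  have hKle : (pvGKeys graph).length ≤ (pvInner graph "graph").size := by
    have := pv_dedup_len_le ((pvInner graph "graph").keys)
    rw [pv_keys_len_eq_size] at this
    exact le_trans (le_of_eq rfl) this
  have hstab := pv_iterB_stable graph start (k + 1) hfix
      ((pvInner graph "graph").size + 1) (by omega)
  rw [hstab]
  intro x
  constructor
  · exact pv_iterB_sound graph start (k + 1) x
  · refine pv_reach_mem_of_closed graph start _ ?_ hcl x
    exact pv_iterB_mono graph start 0 (k + 1) (by omega) start
      ((PySem.Set.mem_ofList _ _).mpr (List.mem_singleton.mpr rfl))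

-- ===== VERDICT (by name: the statement is the Claim_ definition above) =====
theorem ts_transitive_deps_py_spec : Claim_equal_ts_transitive_deps_py := by
  intro start graph _ _
  unfold Spec_ts_transitive_deps_py ts_transitive_deps_py ts_transitive_deps_py_alt
  have hAv : ∀ u, u ∈ (tsLoopA graph PySem.Set.empty [start] PySem.Set.empty).1 ↔
      pvReach graph start u := by
    intro u
    constructor
    · refine loopA_sound graph start _ _ _ (fun u hu => absurd hu (List.not_mem_nil)) ?_ u
      intro y hy
      rw [List.mem_singleton.mp hy]
      exact pvReach.refl
    · refine pv_reach_mem_of_closed graph start _ ?_ ?_ u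
      · exact loopA_stack_sub graph _ _ _ start (List.mem_singleton.mpr rfl)
      · exact loopA_closed graph _ _ _ (fun u hu => absurd hu (List.not_mem_nil))
  have hA : ∀ x, x ∈ (tsLoopA graph PySem.Set.empty [start] PySem.Set.empty).2 ↔
      ∃ u, pvReach graph start u ∧ x ∈ pvMods graph u := by
    intro x
    rw [loopA_modules graph _ _ _ (fun x => by
      constructor
      · intro hx
        exact absurd hx (List.not_mem_nil)
      · rintro ⟨u, hu, _⟩
        exact absurd hu (List.not_mem_nil))]
    constructor
    · rintro ⟨u, hu, hx⟩
      exact ⟨u, (hAv u).mp hu, hx⟩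
    · rintro ⟨u, hu, hx⟩
      exact ⟨u, (hAv u).mpr hu, hx⟩
  have hfold : (PySem.List.pyRange 0 (((pvInner graph "graph").size : Int) + 1) 1).foldl
      (fun S _ => pvStepB graph S) (PySem.Set.ofList [start])
      = pvIterB graph start ((pvInner graph "graph").size + 1) := by
    rw [pv_foldl_const (pvStepB graph), pv_iterate_eq_iterB]
    congr 1
    rw [PySem.List.length_pyRange_one]
    omega
  have hB : ∀ x, x ∈ PySem.Set.ofList
      (((PySem.List.pyRange 0 (((pvInner graph "graph").size : Int) + 1) 1).foldl
        (fun S _ => pvStepB graph S) (PySem.Set.ofList [start])).flatMap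
        (fun v => pvMods graph v)) ↔
      ∃ u, pvReach graph start u ∧ x ∈ pvMods graph u := by
    intro x
    rw [PySem.Set.mem_ofList, List.mem_flatMap, hfold]
    constructor
    · rintro ⟨u, hu, hx⟩
      exact ⟨u, (pv_reachB graph start u).mp hu, hx⟩
    · rintro ⟨u, hu, hx⟩
      exact ⟨u, (pv_reachB graph start u).mpr hu, hx⟩
  have ndA : (tsLoopA graph PySem.Set.empty [start] PySem.Set.empty).2.Nodup :=
    loopA_modules_nodup graph _ _ _ List.nodup_nil
  have ndB := PySem.Set.nodup_ofList
      (((PySem.List.pyRange 0 (((pvInner graph "graph").size : Int) + 1) 1).foldl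
        (fun S _ => pvStepB graph S) (PySem.Set.ofList [start])).flatMap
        (fun v => pvMods graph v))
  have hperm : (tsLoopA graph PySem.Set.empty [start] PySem.Set.empty).2.Perm
      (PySem.Set.ofList
        (((PySem.List.pyRange 0 (((pvInner graph "graph").size : Int) + 1) 1).foldl
          (fun S _ => pvStepB graph S) (PySem.Set.ofList [start])).flatMap
          (fun v => pvMods graph v))) := by
    refine (List.perm_ext_iff_of_nodup ndA ndB).mpr ?_
    intro a
    rw [hA, hB]
  exact PySem.List.sorted_eq_sorted_of_perm _ _ (fun x => x) (fun a b h => h) hperm
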